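-- pv_equiv track=rewrite | github.com/eldon31/rag_clean | processor/ultimate_embedder/chunk_loader.py | normalize_collection_name
-- ===== SOURCE A (Python) =====
-- def normalize_collection_name(raw_name: str) -> str:
--     if not raw_name:
--         return "qdrant_ecosystem"
--
--     normalized = raw_name.strip().lower().replace("-", "_").replace(" ", "_")
--
--     explicit_map = {
--         "qdrant_v4_outputs": "qdrant_ecosystem",
--         "qdrant_ecosystem_v4_outputs": "qdrant_ecosystem",
--         "qdrant_ecosystem": "qdrant_ecosystem",
--         "sentence_transformers_v4_outputs": "sentence_transformers",
--         "sentence_transformers": "sentence_transformers",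
--         "docling_v4_outputs": "docling",
--         "docling": "docling",
--         "fast_docs_v4_outputs": "fast_docs",
--         "fast_docs": "fast_docs",
--         "pydantic_pydantic_v4_outputs": "pydantic",
--         "pydantic_v4_outputs": "pydantic",
--         "pydantic": "pydantic",
--     }
--
--     if normalized in explicit_map:
--         return explicit_map[normalized]
--
--     keyword_map = {
--         "qdrant": "qdrant_ecosystem",
--         "sentence_transformer": "sentence_transformers",
--         "sentence": "sentence_transformers",
--         "docling": "docling",
--         "fast_docs": "fast_docs",
--         "pydantic": "pydantic",
--     }
--
--     for keyword, target in keyword_map.items():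
--         if keyword in normalized:
--             return target
--
--     return normalized
-- ===== SOURCE B (Python) =====
-- def normalize_collection_name(raw_name: str) -> str:
--     if not raw_name:
--         return "qdrant_ecosystem"
--
--     normalized = raw_name.strip().lower().replace("-", "_").replace(" ", "_")
--
--     # Every explicit-map key of the original contains a keyword mapping to the
--     # same target, so a single keyword scan suffices.
--     keyword_map = [
--         ("qdrant", "qdrant_ecosystem"),
--         ("sentence_transformer", "sentence_transformers"),
--         ("sentence", "sentence_transformers"),
--         ("docling", "docling"),
--         ("fast_docs", "fast_docs"),
--         ("pydantic", "pydantic"),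
--     ]
--
--     for keyword, target in keyword_map:
--         if keyword in normalized:
--             return target
--
--     return normalized
-- ===== Notes on version B (the rewrite author's own statement) =====
-- stated objective: simpler
-- what changed: Dropped the 12-entry explicit exact-match dict stage entirely: every explicit key contains a keyword that maps to the same target, so B is a single in-order keyword substring scan after the same normalization chain.
import Mathlib
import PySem

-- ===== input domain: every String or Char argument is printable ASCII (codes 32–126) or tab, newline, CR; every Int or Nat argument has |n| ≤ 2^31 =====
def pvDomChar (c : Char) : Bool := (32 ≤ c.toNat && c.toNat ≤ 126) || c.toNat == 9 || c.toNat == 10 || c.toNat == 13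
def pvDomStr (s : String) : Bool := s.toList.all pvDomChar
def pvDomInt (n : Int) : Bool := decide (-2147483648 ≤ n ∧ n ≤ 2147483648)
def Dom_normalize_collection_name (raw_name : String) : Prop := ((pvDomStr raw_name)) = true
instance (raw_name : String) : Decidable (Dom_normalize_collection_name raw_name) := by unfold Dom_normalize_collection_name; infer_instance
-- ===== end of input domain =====

-- B drops A's explicit exact-match dict (each of its keys is subsumed by a keyword with the
-- same target) and does a single in-order keyword substring scan: simpler, same result.


-- ===== PORT A =====
def pvExplicitMap : PySem.Dict String String := PySem.Dict.ofList
  [ ("qdrant_v4_outputs", "qdrant_ecosystem")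
  , ("qdrant_ecosystem_v4_outputs", "qdrant_ecosystem")
  , ("qdrant_ecosystem", "qdrant_ecosystem")
  , ("sentence_transformers_v4_outputs", "sentence_transformers")
  , ("sentence_transformers", "sentence_transformers")
  , ("docling_v4_outputs", "docling")
  , ("docling", "docling")
  , ("fast_docs_v4_outputs", "fast_docs")
  , ("fast_docs", "fast_docs")
  , ("pydantic_pydantic_v4_outputs", "pydantic")
  , ("pydantic_v4_outputs", "pydantic")
  , ("pydantic", "pydantic") ]

-- keyword_map.items() in insertion order (keys are distinct literals)
def pvKeywordMapA : List (String × String) :=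
  [ ("qdrant", "qdrant_ecosystem")
  , ("sentence_transformer", "sentence_transformers")
  , ("sentence", "sentence_transformers")
  , ("docling", "docling")
  , ("fast_docs", "fast_docs")
  , ("pydantic", "pydantic") ]

-- the 'for keyword, target in keyword_map.items(): if keyword in normalized: return target'
def pvScanA : List (String × String) → String → String
  | [], n => n
  | (k, t) :: rest, n => if PySem.Str.isIn k n then t else pvScanA rest n

-- normalized = raw_name.strip().lower().replace("-", "_").replace(" ", "_")
def pvNormalizeA (raw_name : String) : String :=
  PySem.Str.replace (PySem.Str.replace (PySem.Str.lower (PySem.Str.strip raw_name)) "-" "_") " " "_"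

-- 'if normalized in explicit_map: return explicit_map[normalized]' then the keyword loop
def pvAfterA (n : String) : String :=
  match PySem.Dict.get? pvExplicitMap n with
  | some t => t
  | none => pvScanA pvKeywordMapA n

def normalize_collection_name (raw_name : String) : String :=
  if raw_name == "" then "qdrant_ecosystem"
  else pvAfterA (pvNormalizeA raw_name)

-- ===== PORT B =====
def pvKeywordMapB : List (String × String) :=
  [ ("qdrant", "qdrant_ecosystem")
  , ("sentence_transformer", "sentence_transformers")
  , ("sentence", "sentence_transformers")
  , ("docling", "docling")
  , ("fast_docs", "fast_docs")
  , ("pydantic", "pydantic") ]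

def pvScanB : List (String × String) → String → String
  | [], n => n
  | (k, t) :: rest, n => if PySem.Str.isIn k n then t else pvScanB rest n

def pvNormalizeB (raw_name : String) : String :=
  PySem.Str.replace (PySem.Str.replace (PySem.Str.lower (PySem.Str.strip raw_name)) "-" "_") " " "_"

def normalize_collection_name_alt (raw_name : String) : String :=
  if raw_name == "" then "qdrant_ecosystem"
  else pvScanB pvKeywordMapB (pvNormalizeB raw_name)

-- ===== PRECONDITION & SPEC =====
def Spec_normalize_collection_name (raw_name : String) (out : String) : Prop := out = normalize_collection_name_alt raw_name
instance (raw_name : String) (out : String) : Decidable (Spec_normalize_collection_name raw_name out) := by unfold Spec_normalize_collection_name; infer_instance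

-- ===== CLAIM (what is proved, stated in full; the proofs are below) =====
def Claim_equal_normalize_collection_name : Prop := ∀ (raw_name : String), Dom_normalize_collection_name raw_name → Spec_normalize_collection_name raw_name (normalize_collection_name raw_name)

-- ===== LEMMAS AND PROOFS =====

theorem pvItems : pvExplicitMap.items =
  [ ("qdrant_v4_outputs", "qdrant_ecosystem")
  , ("qdrant_ecosystem_v4_outputs", "qdrant_ecosystem")
  , ("qdrant_ecosystem", "qdrant_ecosystem")
  , ("sentence_transformers_v4_outputs", "sentence_transformers")
  , ("sentence_transformers", "sentence_transformers")
  , ("docling_v4_outputs", "docling")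
  , ("docling", "docling")
  , ("fast_docs_v4_outputs", "fast_docs")
  , ("fast_docs", "fast_docs")
  , ("pydantic_pydantic_v4_outputs", "pydantic")
  , ("pydantic_v4_outputs", "pydantic")
  , ("pydantic", "pydantic") ] := by decide

theorem pvScan_eq (n : String) : pvScanA pvKeywordMapA n = pvScanB pvKeywordMapB n := by
  simp [pvKeywordMapA, pvKeywordMapB, pvScanA, pvScanB]

theorem pvCore (n : String) : pvAfterA n = pvScanB pvKeywordMapB n := by
  unfold pvAfterA
  by_cases h1 : n = "qdrant_v4_outputs"; · subst h1; decide
  by_cases h2 : n = "qdrant_ecosystem_v4_outputs"; · subst h2; decide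
  by_cases h3 : n = "qdrant_ecosystem"; · subst h3; decide
  by_cases h4 : n = "sentence_transformers_v4_outputs"; · subst h4; decide
  by_cases h5 : n = "sentence_transformers"; · subst h5; decide
  by_cases h6 : n = "docling_v4_outputs"; · subst h6; decide
  by_cases h7 : n = "docling"; · subst h7; decide
  by_cases h8 : n = "fast_docs_v4_outputs"; · subst h8; decide
  by_cases h9 : n = "fast_docs"; · subst h9; decide
  by_cases h10 : n = "pydantic_pydantic_v4_outputs"; · subst h10; decide
  by_cases h11 : n = "pydantic_v4_outputs"; · subst h11; decide
  by_cases h12 : n = "pydantic"; · subst h12; decide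
  have hnone : PySem.Dict.get? pvExplicitMap n = none := by
    simp [PySem.Dict.get?]
    intro a b hmem
    rw [pvItems] at hmem
    fin_cases hmem <;> first | exact fun he => h1 he.symm | exact fun he => h2 he.symm | exact fun he => h3 he.symm | exact fun he => h4 he.symm | exact fun he => h5 he.symm | exact fun he => h6 he.symm | exact fun he => h7 he.symm | exact fun he => h8 he.symm | exact fun he => h9 he.symm | exact fun he => h10 he.symm | exact fun he => h11 he.symm | exact fun he => h12 he.symm
  rw [hnone]
  exact pvScan_eq n


-- ===== VERDICT (by name: the statement is the Claim_ definition above) =====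
theorem normalize_collection_name_spec : Claim_equal_normalize_collection_name := by
  intro raw_name _
  unfold Spec_normalize_collection_name normalize_collection_name normalize_collection_name_alt
  by_cases h : raw_name == ((""):String)
  · rw [if_pos h, if_pos h]
  · rw [if_neg h, if_neg h, show pvNormalizeA raw_name = pvNormalizeB raw_name from rfl]
    exact pvCore _
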